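-- pv_equiv track=rewrite | github.com/lyli1013/DeepITEH | Liver/liver-model/window05_evaluation.py | k_mer_split
-- ===== SOURCE A (Python) =====
-- import copy
--
-- def k_mer_split(sequenceList, k_merList):
--     def k_mer(sequence, k):
--         # kmer algorithm
--         splitSequence = []
--         for i in range(len(sequence) - k + 1):
--             tmp = ''
--             for j in range(i, i + k):
--                 tmp += sequence[j]
--
--             splitSequence.append(tmp)
--         return splitSequence
--
--     finalSequenceList = []
--     for k_merNum in k_merList:
--         sequenceTmpList = copy.deepcopy(sequenceList)
--         for i in range(len(sequenceList)):
--             sequenceTmpList[i]['sequence'] = k_mer(sequenceList[i]['sequence'], k_merNum)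
--             finalSequenceList.append(sequenceTmpList[i])
--
--     # Take each word as a feature,
--     avertFinal = finalSequenceList[:len(sequenceList)]
--     for i in range(len(k_merList)):
--         tmplist = finalSequenceList[len(sequenceList) * i:(i + 1) * len(sequenceList)]
--         for dictindex in range(len(tmplist)):
--             avertFinal[dictindex]['sequence'] = avertFinal[dictindex]['sequence']  # + tmplist[dictindex]['sequence']
--
--     finalSequenceList = avertFinal  # finalSequenceList is a list, each element of which is a dictionary, and the sequence in finalSequenceList has been split by k-mer
--
--     wordVectorSeqList = []
--     wordVectorTarList = []
--     for allDictSeq in finalSequenceList: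
--         wordVectorSeqList.append(allDictSeq['sequence'])
--         wordVectorTarList.append(allDictSeq['target'])
--
--     return wordVectorSeqList, wordVectorTarList
-- ===== SOURCE B (Python) =====
-- def k_mer_split(sequenceList, k_merList):
--     if not k_merList:
--         return [], []
--     k = k_merList[0]
--     seqList, tarList = [], []
--     for d in sequenceList:
--         s = d['sequence']
--         seqList.append([s[i:i + k] for i in range(len(s) - k + 1)])
--         tarList.append(d['target'])
--     return seqList, tarList
-- ===== Notes on version B (the rewrite author's own statement) =====
-- stated objective: simpler
-- what changed: B uses only k_merList[0]: one pass over sequenceList building each k-mer list by a slicing comprehension and appending sequence/target directly, dropping A's deepcopy, its per-k loop whose work is discarded, and its no-op rewrite pass; Pre_ excludes dicts missing the 'sequence'/'target' key (KeyError in A) and a negative first k-mer width, outside the natural domain of k-mer splitting, where A's lists of empty strings are an artefact of its empty inner loop.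
-- outside the precondition, e.g. on k_mer_split([{'target': 'x'}], [2]): A raises KeyError, B raises KeyError
import Mathlib
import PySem

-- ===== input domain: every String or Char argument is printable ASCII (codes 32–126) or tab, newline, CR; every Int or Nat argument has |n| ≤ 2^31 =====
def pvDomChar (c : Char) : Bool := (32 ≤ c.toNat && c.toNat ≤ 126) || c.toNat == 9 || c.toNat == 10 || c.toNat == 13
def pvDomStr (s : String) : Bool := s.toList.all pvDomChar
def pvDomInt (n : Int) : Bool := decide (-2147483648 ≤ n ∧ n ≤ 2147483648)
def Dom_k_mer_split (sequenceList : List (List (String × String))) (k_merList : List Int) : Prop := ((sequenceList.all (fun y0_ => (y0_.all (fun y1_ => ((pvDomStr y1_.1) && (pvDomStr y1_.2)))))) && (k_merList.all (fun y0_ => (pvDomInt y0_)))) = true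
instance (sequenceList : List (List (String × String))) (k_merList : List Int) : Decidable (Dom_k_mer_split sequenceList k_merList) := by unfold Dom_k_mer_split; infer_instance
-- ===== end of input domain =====

-- B reads only k_merList[0] and builds both output lists in one slicing pass over sequenceList,
-- dropping A's deepcopy, its discarded per-k work and its no-op rewrite pass (simpler).


-- ===== PORT A =====
-- A's inner helper `k_mer`: character-by-character concatenation of each window.
-- `pyGet? = none` (IndexError) is unreachable: j always lies in range; the `none` branch keeps tmp.
def pvKmerA (cs : List Char) (k : Int) : List String :=
  (PySem.List.pyRange 0 ((cs.length : Int) - k + 1)).foldl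
    (fun splitSequence i =>
      splitSequence ++ [String.ofList ((PySem.List.pyRange i (i + k)).foldl
        (fun tmp j =>
          match PySem.List.pyGet? cs j with
          | some c => tmp ++ [c]
          | none => tmp)
        [])]) []

-- A modifies a deepcopy of each dict, replacing its 'sequence' value (a String) by a List String;
-- that heterogeneous dict is modelled as the pair (new sequence value, original dict); 'target' reads
-- go through the dict ((get? …).getD "" : the KeyError case `none` is excluded by Pre_).
def k_mer_split (sequenceList : List (List (String × String))) (k_merList : List Int) : List (List String) × List String :=
  let n : Int := (sequenceList.length : Int)
  let finalSequenceList : List (List String × PySem.Dict String String) :=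
    k_merList.foldl (fun acc k_merNum =>
      sequenceList.foldl (fun acc2 d =>
        acc2 ++ [(pvKmerA (((PySem.Dict.ofList d).get? "sequence").getD "").toList k_merNum,
                  PySem.Dict.ofList d)]) acc) []
  let avertFinal0 := PySem.List.slice finalSequenceList none (some n)
  let avertFinal :=
    (PySem.List.pyRange 0 (k_merList.length : Int)).foldl (fun av i =>
      let tmplist := PySem.List.slice finalSequenceList (some (n * i)) (some ((i + 1) * n))
      (PySem.List.pyRange 0 (tmplist.length : Int)).foldl (fun av2 dictindex =>
        -- avertFinal[dictindex]['sequence'] = avertFinal[dictindex]['sequence'] : in-place self-assignment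
        av2.modify dictindex.toNat (fun p => (p.1, p.2))) av) avertFinal0
  avertFinal.foldl (fun wv p => (wv.1 ++ [p.1], wv.2 ++ [(p.2.get? "target").getD ""])) ([], [])

-- ===== PORT B =====
-- B's comprehension [s[i:i+k] for i in range(len(s)-k+1)]
def pvKmerB (cs : List Char) (k : Int) : List String :=
  (PySem.List.pyRange 0 ((cs.length : Int) - k + 1)).map
    (fun i => String.ofList (PySem.List.slice cs (some i) (some (i + k))))

def k_mer_split_alt (sequenceList : List (List (String × String))) (k_merList : List Int) : List (List String) × List String :=
  match k_merList with
  | [] => ([], [])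
  | k :: _ =>
    sequenceList.foldl (fun wv d =>
      (wv.1 ++ [pvKmerB (((PySem.Dict.ofList d).get? "sequence").getD "").toList k],
       wv.2 ++ [((PySem.Dict.ofList d).get? "target").getD ""])) ([], [])

-- ===== PRECONDITION & SPEC =====
-- Pre_ excludes (a) inputs on which A raises KeyError (a nonempty k_merList with a dict missing the
-- 'sequence' or 'target' key), and (b) a negative first k-mer width — outside the natural domain of
-- k-mer splitting, where A's lists of empty strings are an artefact of its empty inner loop.
def Pre_k_mer_split (sequenceList : List (List (String × String))) (k_merList : List Int) : Prop :=
  k_merList = [] ∨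
    ((∀ d ∈ sequenceList, "sequence" ∈ d.map Prod.fst ∧ "target" ∈ d.map Prod.fst) ∧
     ∀ k ∈ k_merList.take 1, 0 ≤ k)
instance (sequenceList : List (List (String × String))) (k_merList : List Int) : Decidable (Pre_k_mer_split sequenceList k_merList) := by unfold Pre_k_mer_split; infer_instance

def pvWitness_k_mer_split : (List (List (String × String))) × List Int :=
  ([[("sequence", "ACGT"), ("target", "1")], [("sequence", "AB"), ("target", "0")]], [2])

def Spec_k_mer_split (sequenceList : List (List (String × String))) (k_merList : List Int) (out : List (List String) × List String) : Prop := out = k_mer_split_alt sequenceList k_merList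
instance (sequenceList : List (List (String × String))) (k_merList : List Int) (out : List (List String) × List String) : Decidable (Spec_k_mer_split sequenceList k_merList out) := by unfold Spec_k_mer_split; infer_instance

-- ===== CLAIM (what is proved, stated in full; the proofs are below) =====
def Claim_equal_k_mer_split : Prop := ∀ (sequenceList : List (List (String × String))) (k_merList : List Int), Dom_k_mer_split sequenceList k_merList → Pre_k_mer_split sequenceList k_merList → Spec_k_mer_split sequenceList k_merList (k_mer_split sequenceList k_merList)

-- ===== LEMMAS AND PROOFS =====

theorem pvPyRange_nil {a b : Int} (h : b ≤ a) : PySem.List.pyRange a b = [] := by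
  simp [PySem.List.pyRange]
  omega

-- A's inner window loop equals the slice, for a window that stays inside cs
theorem pvInner_eq (cs : List Char) (a m : Nat) (h : a + m ≤ cs.length) (acc : List Char) :
    (PySem.List.pyRange (a : Int) ((a : Int) + (m : Int))).foldl
      (fun tmp j =>
        match PySem.List.pyGet? cs j with
        | some c => tmp ++ [c]
        | none => tmp) acc
    = acc ++ (cs.drop a).take m := by
  induction m generalizing a acc with
  | zero =>
    rw [pvPyRange_nil (by omega)]
    simp
  | succ m ih =>
    rw [PySem.List.pyRange_one_cons (by omega : (a : Int) < (a : Int) + (((m : Nat) + 1 : Nat) : Int))]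
    simp only [List.foldl_cons]
    rw [PySem.List.pyGet?_ofNat cs a (by omega)]
    have step := ih (a + 1) (by omega) (acc ++ [cs[a]'(by omega)])
    push_cast at step
    have hrw : (a : Int) + (((m : Nat) + 1 : Nat) : Int) = ((a : Int) + 1) + (m : Int) := by
      push_cast; ring
    rw [hrw]
    dsimp only
    rw [step]
    have hdrop : cs.drop a = cs[a]'(by omega) :: cs.drop (a + 1) := by
      rw [List.getElem_cons_drop]
    rw [hdrop, List.take_succ_cons]
    simp

-- the two k-mer computations agree for a nonnegative width
theorem pvKmer_eq (cs : List Char) (k : Int) (hk : 0 ≤ k) : pvKmerA cs k = pvKmerB cs k := by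
  unfold pvKmerA pvKmerB
  rw [PySem.List.foldl_append_singleton_eq_map]
  simp only [List.nil_append]
  apply List.map_congr_left
  intro i hi
  rw [PySem.List.mem_pyRange_one] at hi
  congr 1
  obtain ⟨a, rfl⟩ : ∃ a : Nat, i = (a : Int) := ⟨i.toNat, by omega⟩
  have hstop : (a : Int) + k = ((a + k.toNat : Nat) : Int) := by omega
  rw [hstop, PySem.List.slice_natCast cs a (a + k.toNat),
    show a + k.toNat - a = k.toNat by omega]
  have step := pvInner_eq cs a k.toNat (by omega) []
  rw [show ((a : Nat) : Int) + ((k.toNat : Nat) : Int) = ((a + k.toNat : Nat) : Int) by push_cast; ring] at step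
  rw [step]
  simp

-- the self-assignment pass is the identity
theorem pvNoopInner (l : List Int) (av : List (List String × PySem.Dict String String)) :
    l.foldl (fun av2 dictindex => av2.modify dictindex.toNat (fun p => (p.1, p.2))) av = av := by
  induction l generalizing av with
  | nil => rfl
  | cons x xs ih =>
    have h1 : av.modify x.toNat (fun p => (p.1, p.2)) = av := by
      rw [show (fun p : List String × PySem.Dict String String => (p.1, p.2)) = id from rfl,
        List.modify_id]
    rw [List.foldl_cons, h1, ih]

theorem pvNoopOuter (l : List Int) (fsl : List (List String × PySem.Dict String String)) (n : Int)
    (av : List (List String × PySem.Dict String String)) :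
    l.foldl (fun av i =>
      (PySem.List.pyRange 0 ((PySem.List.slice fsl (some (n * i)) (some ((i + 1) * n))).length : Int)).foldl
        (fun av2 dictindex => av2.modify dictindex.toNat (fun p => (p.1, p.2))) av) av = av := by
  induction l generalizing av with
  | nil => rfl
  | cons x xs ih =>
    simp only [List.foldl_cons]
    rw [pvNoopInner, ih]

theorem pvFlatten (kL : List Int) (f : Int → List (List String × PySem.Dict String String))
    (acc : List (List String × PySem.Dict String String)) :
    kL.foldl (fun acc k => acc ++ f k) acc = acc ++ kL.flatMap f := by
  induction kL generalizing acc with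
  | nil => simp
  | cons k ks ih => simp [ih]

-- ===== VERDICT (by name: the statement is the Claim_ definition above) =====
theorem k_mer_split_spec : Claim_equal_k_mer_split := by
  intro sequenceList k_merList _ hpre
  unfold Spec_k_mer_split k_mer_split k_mer_split_alt
  cases k_merList with
  | nil =>
    simp [PySem.List.slice]
  | cons k ks =>
    have hk : 0 ≤ k := by
      rcases hpre with h | ⟨_, h⟩
      · exact absurd h (by simp)
      · exact h k (by simp)
    have hke : ∀ cs, pvKmerA cs k = pvKmerB cs k := fun cs => pvKmer_eq cs k hk
    simp only []
    have hblock : ∀ (k' : Int) (acc : List (List String × PySem.Dict String String)),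
        sequenceList.foldl (fun acc2 d =>
          acc2 ++ [(pvKmerA (((PySem.Dict.ofList d).get? "sequence").getD "").toList k',
                    PySem.Dict.ofList d)]) acc
        = acc ++ (fun k' => sequenceList.map (fun d =>
            (pvKmerA (((PySem.Dict.ofList d).get? "sequence").getD "").toList k',
             PySem.Dict.ofList d))) k' := by
      intro k' acc
      exact PySem.List.foldl_append_singleton_eq_map _ _ _
    simp only [hblock]
    rw [pvFlatten, pvNoopOuter]
    simp only [List.nil_append, List.flatMap_cons]
    rw [PySem.List.slice_to_natCast]
    rw [show sequenceList.length
        = ((fun k' => sequenceList.map (fun d =>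
            (pvKmerA (((PySem.Dict.ofList d).get? "sequence").getD "").toList k',
             PySem.Dict.ofList d))) k).length from by simp]
    rw [List.take_left]
    rw [List.foldl_map]
    simp only [hke]
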